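-- pv_equiv track=rewrite | github.com/sajjadium/ctf-archives | LIT/2022/crypto/susss/susss.py | convolute
-- ===== SOURCE A (Python) =====
-- def convolute(m,x,p):
-- 	uwu = 0;
-- 	owo = 1;
-- 	for i in range(len(m)):
-- 		for j in range(len(m[i])):
-- 			owo = (owo * x) % p;
-- 			uwu += (owo * m[i][j]) % p;
-- 			uwu %= p;
-- 	return uwu;
-- ===== SOURCE B (Python) =====
-- def convolute(m, x, p):
--     flat = [e for row in m for e in row]
--     if not flat:
--         return 0
--     acc = 0
--     for e in reversed(flat):
--         acc = (acc * x + e) % p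
--     return (acc * x) % p
-- ===== Notes on version B (the rewrite author's own statement) =====
-- stated objective: alternative
-- what changed: Replaces the nested index loops with a running power by flattening the matrix and applying Horner's rule over the reversed entry list, keeping a single accumulator and no power variable.
import Mathlib
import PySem

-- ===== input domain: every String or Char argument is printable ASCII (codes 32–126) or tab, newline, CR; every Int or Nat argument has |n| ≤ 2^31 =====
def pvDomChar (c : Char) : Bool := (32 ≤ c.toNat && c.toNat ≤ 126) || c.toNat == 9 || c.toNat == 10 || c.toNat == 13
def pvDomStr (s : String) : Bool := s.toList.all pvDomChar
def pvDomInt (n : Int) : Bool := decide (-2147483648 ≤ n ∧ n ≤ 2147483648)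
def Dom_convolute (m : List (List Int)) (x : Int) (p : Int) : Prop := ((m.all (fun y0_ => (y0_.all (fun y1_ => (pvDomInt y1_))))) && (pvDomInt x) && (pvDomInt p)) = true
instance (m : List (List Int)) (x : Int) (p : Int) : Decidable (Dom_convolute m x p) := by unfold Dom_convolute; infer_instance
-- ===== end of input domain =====

-- B replaces the nested index loops + running power by Horner's rule over the flattened, reversed entry list (alternative decomposition, same cost).

-- ===== PORT A =====
def convolute (m : List (List Int)) (x : Int) (p : Int) : Int :=
  -- uwu = st.1, owo = st.2
  ((PySem.List.pyRange 0 (PySem.List.len m) 1).foldl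
    (fun (st : Int × Int) i =>
      let row := PySem.List.pyGetD m i []
      (PySem.List.pyRange 0 (PySem.List.len row) 1).foldl
        (fun (st : Int × Int) j =>
          let owo := PySem.Int.mod (st.2 * x) p
          let uwu := PySem.Int.mod (st.1 + PySem.Int.mod (owo * PySem.List.pyGetD row j 0) p) p
          (uwu, owo)) st)
    ((0 : Int), (1 : Int))).1

-- ===== PORT B =====
def convolute_alt (m : List (List Int)) (x : Int) (p : Int) : Int :=
  let flat := m.flatMap (fun row => row)
  if flat = [] then 0
  else PySem.Int.mod ((flat.reverse.foldl (fun acc e => PySem.Int.mod (acc * x + e) p) 0) * x) p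

-- ===== PRECONDITION & SPEC =====
-- Pre_ excludes only p = 0 with at least one matrix entry: there Python A raises ZeroDivisionError.
def Pre_convolute (m : List (List Int)) (x : Int) (p : Int) : Prop :=
  p ≠ 0 ∨ m.flatMap (fun row => row) = []
instance (m : List (List Int)) (x : Int) (p : Int) : Decidable (Pre_convolute m x p) := by unfold Pre_convolute; infer_instance
def pvWitness_convolute : List (List Int) × Int × Int := ([[1, 2], [3]], 2, 5)
def Spec_convolute (m : List (List Int)) (x : Int) (p : Int) (out : Int) : Prop := out = convolute_alt m x p
instance (m : List (List Int)) (x : Int) (p : Int) (out : Int) : Decidable (Spec_convolute m x p out) := by unfold Spec_convolute; infer_instance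

-- ===== CLAIM (what is proved, stated in full; the proofs are below) =====
def Claim_equal_convolute : Prop := ∀ (m : List (List Int)) (x : Int) (p : Int), Dom_convolute m x p → Pre_convolute m x p → Spec_convolute m x p (convolute m x p)

-- ===== LEMMAS AND PROOFS =====

-- the polynomial value e0 + x*(e1 + x*(...)), Horner-style
def pvH (x : Int) : List Int → Int
  | [] => 0
  | e :: t => e + x * pvH x t

-- one step of A's inner loop body on the state (uwu, owo)
def pvStepA (x p : Int) (st : Int × Int) (e : Int) : Int × Int :=
  let owo := PySem.Int.mod (st.2 * x) p
  (PySem.Int.mod (st.1 + PySem.Int.mod (owo * e) p) p, owo)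

theorem pymod_modeq (a p : Int) : PySem.Int.mod a p ≡ a [ZMOD p] := by
  have h := PySem.Int.floordiv_mul_add_mod a p
  exact (Int.modEq_iff_dvd.mpr ⟨-(PySem.Int.floordiv a p), by linear_combination h⟩).symm

theorem pymod_congr {a b p : Int} (hp : p ≠ 0) (h : a ≡ b [ZMOD p]) :
    PySem.Int.mod a p = PySem.Int.mod b p := by
  have hc : PySem.Int.mod a p ≡ PySem.Int.mod b p [ZMOD p] :=
    ((pymod_modeq a p).trans h).trans (pymod_modeq b p).symm
  have hd : p ∣ PySem.Int.mod b p - PySem.Int.mod a p := Int.modEq_iff_dvd.mp hc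
  rcases lt_or_gt_of_ne hp with hneg | hpos
  · have b1 := PySem.Int.mod_neg_bounds (a := a) hneg
    have b2 := PySem.Int.mod_neg_bounds (a := b) hneg
    have := Int.eq_zero_of_abs_lt_dvd (neg_dvd.mpr hd) (by rw [abs_lt]; omega)
    omega
  · have a1 := PySem.Int.mod_nonneg (a := a) hpos
    have a2 := PySem.Int.mod_lt (a := a) hpos
    have b1 := PySem.Int.mod_nonneg (a := b) hpos
    have b2 := PySem.Int.mod_lt (a := b) hpos
    have := Int.eq_zero_of_abs_lt_dvd hd (by rw [abs_lt]; omega)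
    omega

theorem afold {x p : Int} (hp : p ≠ 0) :
    ∀ (l : List Int) (u o : Int), l ≠ [] →
      (l.foldl (pvStepA x p) (u, o)).1 = PySem.Int.mod (u + o * (x * pvH x l)) p := by
  intro l
  induction l with
  | nil => intro u o h; exact absurd rfl h
  | cons e t ih =>
    intro u o _
    cases t with
    | nil =>
      simp only [List.foldl_cons, List.foldl_nil, pvStepA, pvH]
      apply pymod_congr hp
      have h1 : PySem.Int.mod (o * x) p * e ≡ (o * x) * e [ZMOD p] :=
        (pymod_modeq (o * x) p).mul_right e
      have h2 := ((pymod_modeq (PySem.Int.mod (o * x) p * e) p).trans h1).add_left u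
      calc u + PySem.Int.mod (PySem.Int.mod (o * x) p * e) p
          ≡ u + o * x * e [ZMOD p] := h2
        _ = u + o * (x * (e + x * 0)) := by ring
    | cons f t' =>
      rw [List.foldl_cons, ih _ _ (by simp)]
      apply pymod_congr hp
      have hoe : PySem.Int.mod (o * x) p ≡ o * x [ZMOD p] := pymod_modeq (o * x) p
      have hue : (pvStepA x p (u, o) e).1 ≡ u + PySem.Int.mod (o * x) p * e [ZMOD p] :=
        (pymod_modeq _ p).trans ((pymod_modeq (PySem.Int.mod (o * x) p * e) p).add_left u)
      have h3 : (pvStepA x p (u, o) e).1 ≡ u + o * x * e [ZMOD p] :=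
        hue.trans ((hoe.mul_right e).add_left u)
      calc (pvStepA x p (u, o) e).1 + (pvStepA x p (u, o) e).2 * (x * pvH x (f :: t'))
          ≡ (u + o * x * e) + (o * x) * (x * pvH x (f :: t')) [ZMOD p] :=
            h3.add (hoe.mul_right _)
        _ = u + o * (x * pvH x (e :: f :: t')) := by simp only [pvH]; ring

theorem bfold {x p : Int} (l : List Int) :
    l.reverse.foldl (fun acc e => PySem.Int.mod (acc * x + e) p) 0 ≡ pvH x l [ZMOD p] := by
  rw [List.foldl_reverse]
  induction l with
  | nil => simp [pvH]
  | cons e t ih =>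
    simp only [List.foldr_cons, pvH]
    exact (pymod_modeq _ p).trans (by
      calc (t.foldr (fun e acc => PySem.Int.mod (acc * x + e) p) 0) * x + e
          ≡ pvH x t * x + e [ZMOD p] := (ih.mul_right x).add_right e
        _ = e + x * pvH x t := by ring)

theorem convolute_eq_flat (m : List (List Int)) (x p : Int) :
    convolute m x p = ((m.flatMap (fun row => row)).foldl (pvStepA x p) (0, 1)).1 := by
  have inner : ∀ (row : List Int) (st : Int × Int),
      (PySem.List.pyRange 0 (PySem.List.len row) 1).foldl
        (fun (st : Int × Int) j =>
          let owo := PySem.Int.mod (st.2 * x) p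
          let uwu := PySem.Int.mod (st.1 + PySem.Int.mod (owo * PySem.List.pyGetD row j 0) p) p
          (uwu, owo)) st = row.foldl (pvStepA x p) st := by
    intro row st
    exact PySem.List.foldl_pyRange_zero_pyGetD row 0 (pvStepA x p) st
  have main : ∀ (rows : List (List Int)) (st : Int × Int),
      rows.foldl (fun st row =>
        (PySem.List.pyRange 0 (PySem.List.len row) 1).foldl
          (fun (st : Int × Int) j =>
            let owo := PySem.Int.mod (st.2 * x) p
            let uwu := PySem.Int.mod (st.1 + PySem.Int.mod (owo * PySem.List.pyGetD row j 0) p) p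
            (uwu, owo)) st) st
      = (rows.flatMap (fun row => row)).foldl (pvStepA x p) st := by
    intro rows
    induction rows with
    | nil => intro st; simp
    | cons r rs ih =>
      intro st
      simp only [List.foldl_cons, List.flatMap_cons, List.foldl_append]
      rw [inner r st, ih]
  have outer := PySem.List.foldl_pyRange_zero_pyGetD m ([] : List Int)
      (fun (st : Int × Int) row =>
        (PySem.List.pyRange 0 (PySem.List.len row) 1).foldl
          (fun (st : Int × Int) j =>
            let owo := PySem.Int.mod (st.2 * x) p
            let uwu := PySem.Int.mod (st.1 + PySem.Int.mod (owo * PySem.List.pyGetD row j 0) p) p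
            (uwu, owo)) st) ((0 : Int), (1 : Int))
  exact (congrArg Prod.fst outer).trans (congrArg Prod.fst (main m (0, 1)))

-- ===== VERDICT (by name: the statement is the Claim_ definition above) =====
theorem convolute_spec : Claim_equal_convolute := by
  intro m x p _ hpre
  unfold Spec_convolute convolute_alt
  rw [convolute_eq_flat]
  by_cases hflat : m.flatMap (fun row => row) = []
  · simp [hflat]
  · have hp : p ≠ 0 := by rcases hpre with h | h; exact h; exact absurd h hflat
    simp only [if_neg hflat]
    rw [afold hp _ _ _ hflat]
    apply pymod_congr hp
    calc (0 : Int) + 1 * (x * pvH x (m.flatMap fun row => row))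
        = pvH x (m.flatMap fun row => row) * x := by ring
      _ ≡ (((m.flatMap fun row => row).reverse.foldl
            (fun acc e => PySem.Int.mod (acc * x + e) p) 0) * x) [ZMOD p] :=
          ((bfold (x := x) (p := p) (m.flatMap fun row => row)).mul_right x).symm
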